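-- pv_equiv track=rewrite | github.com/fidelity/PhraseExtraction | phraseextraction/candidate_generation.py | __split_phrases
-- ===== SOURCE A (Python) =====
-- def __split_phrases(phrases, ngram=3):
--     """
--     Function to split long phrases
--     @param phrases A list of input phrases.
--     @param ngram An integer specifying the maximum number of grams in a phrase.
--     @return list A list of phrases with each phrase having as many or fewer grams than the input ngram.
--     """
--     final_phrases = []
--     for ph in phrases:
--         list_of_words = ph.split()
--         if len(list_of_words) > ngram:
--             i=0
--             for p in list_of_words:
--                 if i < len(list_of_words)-ngram:
--                     final_phrases.append(" ".join(list_of_words[i:i+ngram]))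
--                 else:
--                     final_phrases.append(" ".join(list_of_words[i:]))
--                 i = i + ngram
--                 if i >= len(list_of_words):
--                     break
--         else:
--             final_phrases.append(ph)
--     return final_phrases
-- ===== SOURCE B (Python) =====
-- def __split_phrases(phrases, ngram=3):
--     final_phrases = []
--     for ph in phrases:
--         words = ph.split()
--         if len(words) <= ngram:
--             final_phrases.append(ph)
--         else:
--             buf = []
--             for w in words:
--                 buf.append(w)
--                 if len(buf) == ngram:
--                     final_phrases.append(" ".join(buf))
--                     buf = []
--             if buf:
--                 final_phrases.append(" ".join(buf))
--     return final_phrases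
-- ===== Notes on version B (the rewrite author's own statement) =====
-- stated objective: simpler
-- what changed: Replaces A's index-stepped slicing loop (counter i, slice windows, explicit break) with a single accumulator pass that collects words into a buffer and emits it whenever it reaches ngram words.
-- outside the precondition, e.g. on __split_phrases(['a b c'], 0): A returns ['', '', ''], B returns ['a b c']; on __split_phrases(['a b c'], -1): A returns ['a b', '', ''], B returns ['a b c']
import Mathlib
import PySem

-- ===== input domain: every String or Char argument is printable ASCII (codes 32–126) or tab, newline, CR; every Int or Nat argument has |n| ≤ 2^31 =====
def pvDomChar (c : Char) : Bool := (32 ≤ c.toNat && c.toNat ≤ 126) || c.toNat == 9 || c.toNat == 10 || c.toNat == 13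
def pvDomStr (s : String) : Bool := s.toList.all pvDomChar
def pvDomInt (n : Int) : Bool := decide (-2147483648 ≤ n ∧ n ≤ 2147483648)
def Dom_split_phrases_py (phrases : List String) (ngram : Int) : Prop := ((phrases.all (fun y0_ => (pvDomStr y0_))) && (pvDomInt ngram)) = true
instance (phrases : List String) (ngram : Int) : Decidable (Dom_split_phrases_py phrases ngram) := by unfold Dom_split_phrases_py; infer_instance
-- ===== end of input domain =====

-- B replaces A's index-stepped slicing loop with a buffer-accumulator pass over the words (simpler decomposition, same cost).

-- ===== PORT A =====
-- A's inner 'for p in list_of_words' loop with counter i and early break.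
def pvAInner (iter : List String) (words : List String) (ngram : Int) (i : Int)
    (acc : List String) : List String :=
  match iter with
  | [] => acc
  | _ :: rest =>
    let acc' := if i < (words.length : Int) - ngram
      then acc ++ [PySem.Str.join " " (PySem.List.slice words (some i) (some (i + ngram)))]
      else acc ++ [PySem.Str.join " " (PySem.List.slice words (some i) none)]
    let i' := i + ngram
    if (words.length : Int) ≤ i' then acc' else pvAInner rest words ngram i' acc'

def split_phrases_py (phrases : List String) (ngram : Int) : List String :=
  phrases.foldl (fun acc ph =>
    let list_of_words := PySem.Str.split₀ ph
    if ngram < (list_of_words.length : Int) then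
      pvAInner list_of_words list_of_words ngram 0 acc
    else acc ++ [ph]) []

-- ===== PORT B =====
-- B's single pass: words flow into buf; emit ' '.join(buf) each time buf reaches ngram words, flush the tail.
def pvBInner (ws : List String) (ngram : Int) (buf : List String)
    (acc : List String) : List String :=
  match ws with
  | [] => if buf.isEmpty then acc else acc ++ [PySem.Str.join " " buf]
  | w :: rest =>
    let buf' := buf ++ [w]
    if (buf'.length : Int) = ngram then
      pvBInner rest ngram [] (acc ++ [PySem.Str.join " " buf'])
    else pvBInner rest ngram buf' acc

def split_phrases_py_alt (phrases : List String) (ngram : Int) : List String :=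
  phrases.foldl (fun acc ph =>
    let words := PySem.Str.split₀ ph
    if (words.length : Int) ≤ ngram then acc ++ [ph]
    else pvBInner words ngram [] acc) []

-- ===== PRECONDITION & SPEC =====
-- Pre_ excludes non-positive ngram, outside the function's natural domain (ngram is a maximum chunk
-- size); A still returns there, but its stream of empty/negative-slice chunks is an artefact of its
-- index arithmetic, while B returns the rejoined phrase.
def Pre_split_phrases_py (phrases : List String) (ngram : Int) : Prop := 1 ≤ ngram
instance (phrases : List String) (ngram : Int) : Decidable (Pre_split_phrases_py phrases ngram) := by
  unfold Pre_split_phrases_py; infer_instance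

def pvWitness_split_phrases_py : List String × Int := (["a b c d", "x y"], 2)

def Spec_split_phrases_py (phrases : List String) (ngram : Int) (out : List String) : Prop :=
  out = split_phrases_py_alt phrases ngram
instance (phrases : List String) (ngram : Int) (out : List String) :
    Decidable (Spec_split_phrases_py phrases ngram out) := by
  unfold Spec_split_phrases_py; infer_instance

-- ===== CLAIM (what is proved, stated in full; the proofs are below) =====
def Claim_equal_split_phrases_py : Prop := ∀ (phrases : List String) (ngram : Int),
  Dom_split_phrases_py phrases ngram → Pre_split_phrases_py phrases ngram →
  Spec_split_phrases_py phrases ngram (split_phrases_py phrases ngram)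

-- ===== LEMMAS AND PROOFS =====

-- common characterisation: the list of ' '-joined chunks of at most n words
def pvChunks (n : Nat) : List String → List String
  | [] => []
  | w :: rest =>
    PySem.Str.join " " ((w :: rest).take n) :: pvChunks n (rest.drop (n - 1))
termination_by ws => ws.length
decreasing_by
  simp only [List.length_drop, List.length_cons]
  omega

lemma pvChunks_cons (n : Nat) (hn : 0 < n) (w : String) (rest : List String) :
    pvChunks n (w :: rest)
      = PySem.Str.join " " ((w :: rest).take n) :: pvChunks n ((w :: rest).drop n) := by
  rw [pvChunks]
  have hdrop : rest.drop (n - 1) = (w :: rest).drop n := by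
    obtain ⟨m, rfl⟩ : ∃ m, n = m + 1 := ⟨n - 1, (Nat.succ_pred_eq_of_pos hn).symm⟩
    simp
  rw [hdrop]

lemma pvBInner_eq (n : Nat) (hn : 0 < n) :
    ∀ (ws buf acc : List String), buf.length < n →
      pvBInner ws (n : Int) buf acc = acc ++ pvChunks n (buf ++ ws) := by
  intro ws
  induction ws with
  | nil =>
    intro buf acc hb
    cases buf with
    | nil => simp [pvBInner, pvChunks]
    | cons b bs =>
      simp only [pvBInner, List.isEmpty_cons, List.append_nil]
      rw [pvChunks_cons n hn]
      have h1 : (b :: bs).take n = b :: bs := List.take_of_length_le (Nat.le_of_lt hb)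
      have h2 : (b :: bs).drop n = [] := List.drop_eq_nil_of_le (Nat.le_of_lt hb)
      simp [h1, h2, pvChunks]
  | cons w rest ih =>
    intro buf acc hb
    simp only [pvBInner]
    by_cases hfull : ((buf ++ [w]).length : Int) = (n : Int)
    · have hlen : (buf ++ [w]).length = n := by exact_mod_cast hfull
      rw [if_pos hfull, ih [] _ hn]
      have hne : buf ++ w :: rest = (buf ++ [w]) ++ rest := by simp
      rw [hne]
      obtain ⟨b, bs, hb0⟩ : ∃ b bs, buf ++ [w] = b :: bs := by
        cases h : buf ++ [w] with
        | nil => simp at h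
        | cons b bs => exact ⟨b, bs, rfl⟩
      rw [hb0, List.cons_append, pvChunks_cons n hn]
      rw [← List.cons_append, ← hb0]
      have ht : ((buf ++ [w]) ++ rest).take n = buf ++ [w] := by
        rw [List.take_append_of_le_length hlen.ge, List.take_of_length_le hlen.le]
      have hd : ((buf ++ [w]) ++ rest).drop n = rest := by
        rw [List.drop_append_of_le_length hlen.ge, List.drop_eq_nil_of_le hlen.le,
          List.nil_append]
      rw [ht, hd]
      simp
    · have hlt : (buf ++ [w]).length < n := by
        have hle : (buf ++ [w]).length ≤ n := by
          simp only [List.length_append, List.length_singleton]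
          omega
        rcases lt_or_eq_of_le hle with h | h
        · exact h
        · exact absurd (by exact_mod_cast h) hfull
      rw [if_neg hfull, ih _ _ hlt]
      simp

lemma pvAInner_eq (n : Nat) (hn : 0 < n) :
    ∀ (iter : List String) (words : List String) (j : Nat) (acc : List String),
      j < words.length → words.length - j ≤ iter.length * n →
      pvAInner iter words (n : Int) (j : Int) acc = acc ++ pvChunks n (words.drop j) := by
  intro iter
  induction iter with
  | nil =>
    intro words j acc hj hfuel
    simp only [List.length_nil, Nat.zero_mul, Nat.le_zero] at hfuel
    omega
  | cons p rest ih =>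
    intro words j acc hj hfuel
    obtain ⟨b, bs, hdj⟩ : ∃ b bs, words.drop j = b :: bs := by
      cases h : words.drop j with
      | nil =>
        have hle : words.length ≤ j := by
          have := List.drop_eq_nil_iff.mp h
          omega
        omega
      | cons b bs => exact ⟨b, bs, rfl⟩
    have hchunk : pvChunks n (words.drop j)
        = PySem.Str.join " " ((words.drop j).take n) :: pvChunks n (words.drop (j + n)) := by
      rw [hdj, pvChunks_cons n hn, ← hdj, List.drop_drop]
    -- the appended chunk is join of (words.drop j).take n in both branches
    have hacc : (if (j : Int) < (words.length : Int) - (n : Int)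
        then acc ++ [PySem.Str.join " " (PySem.List.slice words (some (j : Int)) (some ((j : Int) + (n : Int))))]
        else acc ++ [PySem.Str.join " " (PySem.List.slice words (some (j : Int)) none)])
        = acc ++ [PySem.Str.join " " ((words.drop j).take n)] := by
      by_cases hcase : (j : Int) < (words.length : Int) - (n : Int)
      · rw [if_pos hcase]
        rw [show ((j : Int) + (n : Int)) = (((j + n : Nat) : Int)) by push_cast; ring]
        rw [PySem.List.slice_natCast]
        have he : j + n - j = n := by omega
        rw [he]
      · rw [if_neg hcase]
        rw [PySem.List.slice_from_natCast]
        have : n + j ≥ words.length := by omega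
        rw [List.take_of_length_le (by rw [List.length_drop]; omega)]
    simp only [pvAInner]
    rw [hacc]
    by_cases hstop : (words.length : Int) ≤ (j : Int) + (n : Int)
    · rw [if_pos hstop]
      have hdrop : words.drop (j + n) = [] := List.drop_eq_nil_of_le (by omega)
      rw [hchunk, hdrop]
      simp [pvChunks]
    · rw [if_neg hstop]
      have hjn : j + n < words.length := by omega
      rw [show ((j : Int) + (n : Int)) = (((j + n : Nat) : Int)) by push_cast; ring]
      rw [ih words (j + n) _ hjn (by
        simp only [List.length_cons] at hfuel
        have hmul : (rest.length + 1) * n = rest.length * n + n := by ring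
        omega)]
      rw [hchunk]
      simp

lemma pvBody_eq (ngram : Int) (hn : 1 ≤ ngram) (acc : List String) (ph : String) :
    (let list_of_words := PySem.Str.split₀ ph
     if ngram < (list_of_words.length : Int) then
       pvAInner list_of_words list_of_words ngram 0 acc
     else acc ++ [ph])
    = (let words := PySem.Str.split₀ ph
       if (words.length : Int) ≤ ngram then acc ++ [ph]
       else pvBInner words ngram [] acc) := by
  simp only
  set ws := PySem.Str.split₀ ph with hws
  by_cases hlong : ngram < (ws.length : Int)
  · rw [if_pos hlong, if_neg (by omega)]
    obtain ⟨n, hn0⟩ : ∃ n : Nat, ngram = (n : Int) := ⟨ngram.toNat, (Int.toNat_of_nonneg (by omega)).symm⟩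
    have hnpos : 0 < n := by omega
    subst hn0
    have hlen : n < ws.length := by exact_mod_cast hlong
    rw [show (0 : Int) = ((0 : Nat) : Int) by norm_num]
    rw [pvAInner_eq n hnpos ws ws 0 acc (by omega) (by
      calc ws.length - 0 = ws.length := by omega
        _ ≤ ws.length * n := Nat.le_mul_of_pos_right _ hnpos)]
    rw [pvBInner_eq n hnpos ws [] acc (by simpa using hnpos)]
    simp
  · rw [if_neg hlong, if_pos (by omega)]

-- ===== VERDICT (by name: the statement is the Claim_ definition above) =====
theorem split_phrases_py_spec : Claim_equal_split_phrases_py := by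
  intro phrases ngram _hdom hpre
  unfold Spec_split_phrases_py split_phrases_py split_phrases_py_alt
  apply PySem.List.foldl_congr_mem
  intro acc ph _
  exact pvBody_eq ngram hpre acc ph
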